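-- pv_equiv track=rewrite | github.com/aakriti04/kiro_micro_tools | src/formatter.py | _update_level_after_line
-- ===== SOURCE A (Python) =====
-- def _update_level_after_line(line: str, line_level: int, in_string: bool) -> int:
--     """
--     Update indentation level after processing a line.
--
--     Args:
--         line: The stripped line that was just processed
--         line_level: The indentation level used for this line
--         in_string: Whether we're currently in a multi-line string
--
--     Returns:
--         The new indentation level for subsequent lines
--     """
--     if in_string:
--         return line_level
--
--     # Count braces in the line (excluding those in strings)
--     open_braces = 0
--     close_braces = 0
--     in_line_string = False
--     i = 0
--
--     while i < len(line):
--         char = line[i]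
--
--         # Handle escaped characters
--         if char == '\\' and i + 1 < len(line):
--             i += 2
--             continue
--
--         # Handle quotes
--         if char == '"':
--             in_line_string = not in_line_string
--
--         # Count braces only when not in string
--         if not in_line_string:
--             if char == '{':
--                 open_braces += 1
--             elif char == '}':
--                 close_braces += 1
--
--         i += 1
--
--     # Calculate net change in brace level
--     net_change = open_braces - close_braces
--
--     # If line starts with closing brace, we already decreased for this line
--     # So we need to account for that
--     if line.startswith('}'):
--         return line_level + net_change + 1
--     else:
--         return line_level + net_change
-- ===== SOURCE B (Python) =====
-- def _update_level_after_line(line: str, line_level: int, in_string: bool) -> int: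
--     if in_string:
--         return line_level
--     # Stage 1: delete every backslash escape pair (backslash + following char).
--     cleaned = []
--     i = 0
--     while i < len(line):
--         if line[i] == '\\' and i + 1 < len(line):
--             i += 2
--         else:
--             cleaned.append(line[i])
--             i += 1
--     # Stage 2: split on double quotes; segments at even positions are outside strings.
--     net = 0
--     outside = True
--     for seg in ''.join(cleaned).split('"'):
--         if outside:
--             net += seg.count('{') - seg.count('}')
--         outside = not outside
--     if line.startswith('}'):
--         return line_level + net + 1
--     return line_level + net
-- ===== Notes on version B (the rewrite author's own statement) =====
-- stated objective: alternative
-- what changed: B replaces A's single quote-toggling counting scan by a staged pipeline: strip backslash-escape pairs, split the residue on double quotes, and sum the brace balance of only the alternating outside segments.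
import Mathlib
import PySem

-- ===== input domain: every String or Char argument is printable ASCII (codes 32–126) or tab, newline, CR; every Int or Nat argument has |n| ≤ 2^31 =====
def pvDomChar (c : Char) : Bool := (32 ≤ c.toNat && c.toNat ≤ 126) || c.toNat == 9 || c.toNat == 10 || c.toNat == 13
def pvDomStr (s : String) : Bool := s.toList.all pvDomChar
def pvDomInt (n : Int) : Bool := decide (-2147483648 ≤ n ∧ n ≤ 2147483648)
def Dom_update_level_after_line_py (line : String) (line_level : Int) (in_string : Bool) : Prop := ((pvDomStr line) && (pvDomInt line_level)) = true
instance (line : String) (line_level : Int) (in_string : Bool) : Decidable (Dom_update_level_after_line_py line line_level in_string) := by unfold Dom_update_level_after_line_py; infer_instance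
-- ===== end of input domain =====

-- B re-derives the same count by a staged pipeline — strip escape pairs, split on double
-- quotes, sum brace balance of alternating outside segments — instead of A's single
-- quote-toggling counting scan (alternative decomposition, same cost).


-- ===== PORT A =====
-- the while loop: state (in_line_string, open_braces, close_braces); a backslash with a
-- following character consumes two characters (rest.tail), exactly as `i += 2; continue`
def pvALoop : List Char → Bool → Int → Int → Int × Int
  | [], _, o, c => (o, c)
  | ch :: rest, ins, o, c =>
    if ch = '\\' ∧ rest ≠ [] then pvALoop rest.tail ins o c
    else
      if !(if ch = '"' then !ins else ins) then
        if ch = '{' then pvALoop rest (if ch = '"' then !ins else ins) (o + 1) c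
        else if ch = '}' then pvALoop rest (if ch = '"' then !ins else ins) o (c + 1)
        else pvALoop rest (if ch = '"' then !ins else ins) o c
      else pvALoop rest (if ch = '"' then !ins else ins) o c
termination_by cs => cs.length
decreasing_by all_goals simp [List.length_tail]

def update_level_after_line_py (line : String) (line_level : Int) (in_string : Bool) : Int :=
  if in_string then line_level
  else
    let oc := pvALoop line.toList false 0 0
    let net_change := oc.1 - oc.2
    if PySem.Str.startswith line "}" then line_level + net_change + 1
    else line_level + net_change

-- ===== PORT B =====
-- stage 1: drop every backslash escape pair (backslash plus the following character)
def pvStrip : List Char → List Char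
  | [] => []
  | ch :: rest =>
    if ch = '\\' ∧ rest ≠ [] then pvStrip rest.tail
    else ch :: pvStrip rest
termination_by cs => cs.length
decreasing_by all_goals simp [List.length_tail]

-- stage 2: str.split('"'), ported by hand on the character list (exact: Python's split on a
-- single-character separator yields the segments between quotes, with empty segments kept)
def pvSplit : List Char → List (List Char)
  | [] => [[]]
  | ch :: rest =>
    if ch = '"' then [] :: pvSplit rest
    else
      match pvSplit rest with
      | s :: ss => (ch :: s) :: ss
      | [] => [[ch]]

def pvSegDelta (seg : List Char) : Int :=
  (PySem.List.count seg '{' : Int) - (PySem.List.count seg '}' : Int)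

-- stage 3: the for loop over the segments, alternating the `outside` flag
def pvBNet : List (List Char) → Bool → Int → Int
  | [], _, net => net
  | seg :: rest, outside, net =>
    pvBNet rest (!outside) (if outside then net + pvSegDelta seg else net)

def update_level_after_line_py_alt (line : String) (line_level : Int) (in_string : Bool) : Int :=
  if in_string then line_level
  else
    let net := pvBNet (pvSplit (pvStrip line.toList)) true 0
    if PySem.Str.startswith line "}" then line_level + net + 1
    else line_level + net

-- ===== PRECONDITION & SPEC =====
def Spec_update_level_after_line_py (line : String) (line_level : Int) (in_string : Bool) (out : Int) : Prop := out = update_level_after_line_py_alt line line_level in_string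
instance (line : String) (line_level : Int) (in_string : Bool) (out : Int) : Decidable (Spec_update_level_after_line_py line line_level in_string out) := by unfold Spec_update_level_after_line_py; infer_instance

-- ===== CLAIM (what is proved, stated in full; the proofs are below) =====
def Claim_equal_update_level_after_line_py : Prop := ∀ (line : String) (line_level : Int) (in_string : Bool), Dom_update_level_after_line_py line line_level in_string → Spec_update_level_after_line_py line line_level in_string (update_level_after_line_py line line_level in_string)

-- ===== LEMMAS AND PROOFS =====
-- A's counting scan specialised to a list with no escape pairs left
def pvCount : List Char → Bool → Int → Int → Int × Int
  | [], _, o, c => (o, c)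
  | ch :: rest, ins, o, c =>
    if !(if ch = '"' then !ins else ins) then
      if ch = '{' then pvCount rest (if ch = '"' then !ins else ins) (o + 1) c
      else if ch = '}' then pvCount rest (if ch = '"' then !ins else ins) o (c + 1)
      else pvCount rest (if ch = '"' then !ins else ins) o c
    else pvCount rest (if ch = '"' then !ins else ins) o c

theorem pvALoop_eq_count_strip (cs : List Char) (ins : Bool) (o c : Int) :
    pvALoop cs ins o c = pvCount (pvStrip cs) ins o c := by
  fun_induction pvStrip cs generalizing ins o c with
  | case1 => simp [pvALoop, pvCount]
  | case2 ch rest h ih => simp only [pvALoop, if_pos h, ih]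
  | case3 ch rest h ih =>
    simp only [pvALoop, if_neg h, pvCount]
    split_ifs <;> simp [ih]

theorem pvSplit_ne_nil (cs : List Char) : pvSplit cs ≠ [] := by
  cases cs with
  | nil => simp [pvSplit]
  | cons ch rest =>
    simp only [pvSplit]
    split_ifs
    · simp
    · cases h : pvSplit rest <;> simp

theorem pvBNet_acc (segs : List (List Char)) (out : Bool) (a b : Int) :
    pvBNet segs out (a + b) = a + pvBNet segs out b := by
  induction segs generalizing out a b with
  | nil => simp [pvBNet]
  | cons seg rest ih =>
    simp only [pvBNet]
    split_ifs with h
    · rw [add_assoc]; exact ih _ _ _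
    · exact ih _ _ _

theorem pvCount_net (cs : List Char) (ins : Bool) (o c : Int) :
    (pvCount cs ins o c).1 - (pvCount cs ins o c).2
      = o - c + pvBNet (pvSplit cs) (!ins) 0 := by
  induction cs generalizing ins o c with
  | nil => cases ins <;> simp [pvCount, pvSplit, pvBNet, pvSegDelta, PySem.List.count]
  | cons ch rest ih =>
    by_cases hq : ch = '"'
    · subst hq
      have h1 : ('"':Char) ≠ '{' := by decide
      have h2 : ('"':Char) ≠ '}' := by decide
      simp only [pvCount, pvSplit, if_neg h1, if_neg h2]
      cases ins <;>
        simp_all [pvBNet, pvSegDelta, PySem.List.count]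
    · obtain ⟨s, ss, hsp⟩ : ∃ s ss, pvSplit rest = s :: ss := by
        cases h : pvSplit rest with
        | nil => exact absurd h (pvSplit_ne_nil rest)
        | cons a b => exact ⟨a, b, rfl⟩
      have hsp' : pvSplit (ch :: rest) = (ch :: s) :: ss := by
        simp [pvSplit, hq, hsp]
      cases ins with
      | true =>
        -- inside a string: nothing is counted, the head segment is skipped either way
        simp only [pvCount, if_neg hq]
        simp only [Bool.not_true, Bool.false_eq_true, if_false]  -- !true = false
        rw [ih, hsp, hsp']
        simp [pvBNet]
      | false =>
        have hd : pvSegDelta (ch :: s)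
            = ((if ch = '{' then (1:Int) else 0) - (if ch = '}' then 1 else 0)) + pvSegDelta s := by
          simp only [pvSegDelta, PySem.List.count_eq, List.count_cons]
          split_ifs <;> simp_all <;> push_cast <;> ring
        simp only [pvCount, if_neg hq]
        rw [hsp']
        have hbn : pvBNet ((ch :: s) :: ss) (!false) 0
            = ((if ch = '{' then (1:Int) else 0) - (if ch = '}' then 1 else 0))
              + pvBNet (s :: ss) (!false) 0 := by
          simp only [Bool.not_false, pvBNet, if_true, hd]
          rw [zero_add, zero_add]
          exact pvBNet_acc ss (!true) _ _
        rw [hbn, ← hsp]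
        split_ifs with h1 h2 h3 <;> simp_all <;> ring

-- ===== VERDICT (by name: the statement is the Claim_ definition above) =====
theorem update_level_after_line_py_spec : Claim_equal_update_level_after_line_py := by
  intro line line_level in_string _
  unfold Spec_update_level_after_line_py update_level_after_line_py update_level_after_line_py_alt
  by_cases h : in_string = true
  · simp [h]
  · simp only [Bool.not_eq_true] at h
    simp only [h, if_neg Bool.false_ne_true]
    rw [pvALoop_eq_count_strip]
    have := pvCount_net (pvStrip line.toList) false 0 0
    simp only [Bool.not_false] at this
    rw [this]
    split_ifs <;> ring
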